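-- pv_equiv track=rewrite | github.com/marcosd4h/DeepExtractRuntime | helpers/rpc_stub_parser.py | _split_params
-- ===== SOURCE A (Python) =====
-- def _split_params(params_str: str) -> list[str]:
--     """Split a C# parameter list respecting angle brackets for generics."""
--     parts: list[str] = []
--     depth = 0
--     current: list[str] = []
--     for ch in params_str:
--         if ch == "<":
--             depth += 1
--             current.append(ch)
--         elif ch == ">":
--             depth -= 1
--             current.append(ch)
--         elif ch == "," and depth == 0:
--             parts.append("".join(current).strip())
--             current = []
--         else:
--             current.append(ch)
--     remainder = "".join(current).strip()
--     if remainder: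
--         parts.append(remainder)
--     return parts
-- ===== SOURCE B (Python) =====
-- def _split_params(params_str: str) -> list[str]:
--     """Split a C# parameter list respecting angle brackets for generics.
--
--     Different decomposition: find the first top-level comma, slice the string
--     there and recurse on the remainder, instead of one accumulating pass.
--     """
--     depth = 0
--     for i, ch in enumerate(params_str):
--         if ch == "<":
--             depth += 1
--         elif ch == ">":
--             depth -= 1
--         elif ch == "," and depth == 0:
--             return [params_str[:i].strip()] + _split_params(params_str[i + 1:])
--     tail = params_str.strip()
--     return [tail] if tail else []
-- ===== Notes on version B (the rewrite author's own statement) =====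
-- stated objective: alternative
-- what changed: A does one accumulating pass building each piece char-by-char in a buffer; B instead locates the first top-level comma, slices the string there and recurses on the remainder (slice-and-recurse vs single fold with buffer state).
import Mathlib
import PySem

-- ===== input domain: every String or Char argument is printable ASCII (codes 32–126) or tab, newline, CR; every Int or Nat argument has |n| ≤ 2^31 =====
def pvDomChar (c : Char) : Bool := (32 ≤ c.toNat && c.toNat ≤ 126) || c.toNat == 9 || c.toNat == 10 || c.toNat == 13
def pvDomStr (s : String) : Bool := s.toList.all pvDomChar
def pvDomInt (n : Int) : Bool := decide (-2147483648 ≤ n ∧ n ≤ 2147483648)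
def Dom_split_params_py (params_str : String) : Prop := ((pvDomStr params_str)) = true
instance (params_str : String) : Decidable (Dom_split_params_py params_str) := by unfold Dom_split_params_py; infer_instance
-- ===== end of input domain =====

-- B changes the decomposition: slice at the first top-level comma and recurse, instead of A's
-- single fold that grows each piece in a character buffer; same values, 'alternative' objective.

-- ===== PORT A =====
-- one step of A's for-loop: state = (parts, depth, current)
def splitStepA (st : List String × Int × List Char) (ch : Char) :
    List String × Int × List Char :=
  if ch = '<' then (st.1, st.2.1 + 1, st.2.2 ++ [ch])
  else if ch = '>' then (st.1, st.2.1 - 1, st.2.2 ++ [ch])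
  else if ch = ',' ∧ st.2.1 = 0 then
    (st.1 ++ [PySem.Str.strip (String.ofList st.2.2)], st.2.1, [])
  else (st.1, st.2.1, st.2.2 ++ [ch])

def split_params_py (params_str : String) : List String :=
  let st := params_str.toList.foldl splitStepA ([], 0, [])
  let remainder := PySem.Str.strip (String.ofList st.2.2)
  if remainder = "" then st.1 else st.1 ++ [remainder]

-- ===== PORT B =====
-- find the first comma at depth 0: returns (chars before it, chars after it)
def findSplit : List Char → Int → Option (List Char × List Char)
  | [], _ => none
  | c :: cs, d =>
    if c = '<' then (findSplit cs (d + 1)).map (fun pr => (c :: pr.1, pr.2))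
    else if c = '>' then (findSplit cs (d - 1)).map (fun pr => (c :: pr.1, pr.2))
    else if c = ',' ∧ d = 0 then some ([], cs)
    else (findSplit cs d).map (fun pr => (c :: pr.1, pr.2))

theorem findSplit_length : ∀ (l : List Char) (d : Int) (p r : List Char),
    findSplit l d = some (p, r) → r.length < l.length := by
  intro l
  induction l with
  | nil => intro d p r h; simp [findSplit] at h
  | cons c cs ih =>
    intro d p r h
    simp only [findSplit] at h
    split_ifs at h with h1 h2 h3
    · rcases Option.map_eq_some_iff.mp h with ⟨⟨p', r'⟩, hf, he⟩
      cases he; exact Nat.lt_trans (ih _ _ _ hf) (by simp)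
    · rcases Option.map_eq_some_iff.mp h with ⟨⟨p', r'⟩, hf, he⟩
      cases he; exact Nat.lt_trans (ih _ _ _ hf) (by simp)
    · cases h; simp
    · rcases Option.map_eq_some_iff.mp h with ⟨⟨p', r'⟩, hf, he⟩
      cases he; exact Nat.lt_trans (ih _ _ _ hf) (by simp)

def altGo (l : List Char) : List String :=
  match h : findSplit l 0 with
  | some (p, r) => PySem.Str.strip (String.ofList p) :: altGo r
  | none =>
    let t := PySem.Str.strip (String.ofList l)
    if t = "" then [] else [t]
termination_by l.length
decreasing_by exact findSplit_length l 0 p r h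

def split_params_py_alt (params_str : String) : List String :=
  altGo params_str.toList

-- ===== PRECONDITION & SPEC =====
def Spec_split_params_py (params_str : String) (out : List String) : Prop := out = split_params_py_alt params_str
instance (params_str : String) (out : List String) : Decidable (Spec_split_params_py params_str out) := by unfold Spec_split_params_py; infer_instance

-- ===== CLAIM (what is proved, stated in full; the proofs are below) =====
def Claim_equal_split_params_py : Prop := ∀ (params_str : String), Dom_split_params_py params_str → Spec_split_params_py params_str (split_params_py params_str)

-- ===== LEMMAS AND PROOFS =====

-- the trailing segment as A finalizes it ("append remainder iff non-empty after strip")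
def tailOf (cur : List Char) : List String :=
  if PySem.Str.strip (String.ofList cur) = "" then [] else [PySem.Str.strip (String.ofList cur)]

def finalize (st : List String × Int × List Char) : List String :=
  if PySem.Str.strip (String.ofList st.2.2) = "" then st.1 else st.1 ++ [PySem.Str.strip (String.ofList st.2.2)]

theorem finalize_eq (parts : List String) (d : Int) (cur : List Char) :
    finalize (parts, d, cur) = parts ++ tailOf cur := by
  simp only [finalize, tailOf]
  split_ifs <;> simp

theorem altGo_eq (l : List Char) :
    altGo l = match findSplit l 0 with
      | some (p, r) => PySem.Str.strip (String.ofList p) :: altGo r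
      | none => tailOf l := by
  rw [altGo]
  cases h : findSplit l 0 with
  | none => simp [tailOf]
  | some pr => rfl

-- A's loop run from any state, finalized, equals parts ++ (B's view from that state)
theorem loop_main : ∀ (l : List Char) (parts : List String) (d : Int) (cur : List Char),
    finalize (l.foldl splitStepA (parts, d, cur)) =
      parts ++ (match findSplit l d with
        | some (p, r) => PySem.Str.strip (String.ofList (cur ++ p)) :: altGo r
        | none => tailOf (cur ++ l)) := by
  intro l
  induction l with
  | nil =>
    intro parts d cur
    simp [findSplit, finalize_eq]
  | cons c cs ih =>
    intro parts d cur
    by_cases h1 : c = '<'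
    · subst h1
      have hstep : splitStepA (parts, d, cur) '<' = (parts, d + 1, cur ++ ['<']) := by
        simp [splitStepA]
      have hfs : findSplit ('<' :: cs) d =
          (findSplit cs (d + 1)).map (fun pr => ('<' :: pr.1, pr.2)) := by simp [findSplit]
      rw [List.foldl_cons, hstep, ih, hfs]
      cases hf : findSplit cs (d + 1) with
      | none => simp [List.append_assoc]
      | some pr => cases pr; simp [List.append_assoc]
    · by_cases h2 : c = '>'
      · subst h2
        have hstep : splitStepA (parts, d, cur) '>' = (parts, d - 1, cur ++ ['>']) := by
          simp [splitStepA]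
        have hfs : findSplit ('>' :: cs) d =
            (findSplit cs (d - 1)).map (fun pr => ('>' :: pr.1, pr.2)) := by simp [findSplit]
        rw [List.foldl_cons, hstep, ih, hfs]
        cases hf : findSplit cs (d - 1) with
        | none => simp [List.append_assoc]
        | some pr => cases pr; simp [List.append_assoc]
      · by_cases h3 : c = ',' ∧ d = 0
        · obtain ⟨hc, hd⟩ := h3
          subst hc hd
          have hstep : splitStepA (parts, 0, cur) ',' =
              (parts ++ [PySem.Str.strip (String.ofList cur)], 0, []) := by simp [splitStepA]
          have hfs : findSplit (',' :: cs) 0 = some ([], cs) := by simp [findSplit]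
          rw [List.foldl_cons, hstep, ih, hfs]
          cases hf : findSplit cs 0 with
          | none =>
            have hA : altGo cs = tailOf cs := by rw [altGo_eq, hf]
            simp [hA]
          | some pr =>
            cases pr with
            | mk p r =>
              have hA : altGo cs = PySem.Str.strip (String.ofList p) :: altGo r := by
                rw [altGo_eq, hf]
              simp [hA]
        · have hstep : splitStepA (parts, d, cur) c = (parts, d, cur ++ [c]) := by
            simp [splitStepA, h1, h2, h3]
          have hfs : findSplit (c :: cs) d =
              (findSplit cs d).map (fun pr => (c :: pr.1, pr.2)) := by
            simp [findSplit, h1, h2, h3]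
          rw [List.foldl_cons, hstep, ih, hfs]
          cases hf : findSplit cs d with
          | none => simp [List.append_assoc]
          | some pr => cases pr; simp [List.append_assoc]

-- ===== VERDICT (by name: the statement is the Claim_ definition above) =====
theorem split_params_py_spec : Claim_equal_split_params_py := by
  intro s _
  unfold Spec_split_params_py split_params_py split_params_py_alt
  have h := loop_main s.toList [] 0 []
  simp only [finalize] at h
  rw [h, altGo_eq]
  cases hf : findSplit s.toList 0 with
  | none => simp
  | some pr => cases pr; simp
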